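-- pv_equiv track=rewrite | github.com/Pbao269/HealthHack-MSCS | epi-risk-lite/app/parsers/normalize.py | infer_column_mapping
-- ===== SOURCE A (Python) =====
-- from typing import Dict, List, Optional, Any
--
-- def normalize_column_name(name: str) -> str:
--     """Normalize column names to lowercase and strip whitespace."""
--     return str(name).lower().strip().replace(" ", "_")
--
-- def infer_column_mapping(columns: List[str]) -> Dict[str, str]:
--     """
--     Infer semantic meaning of columns from their names.
--
--     Returns dict mapping semantic name to actual column name.
--     """
--     normalized = {normalize_column_name(c): c for c in columns}
--     mapping = {}
--
--     # rsID / SNP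
--     for key in ["rsid", "snp", "rs_id", "variant_id"]:
--         if key in normalized:
--             mapping["rsid"] = normalized[key]
--             break
--
--     # Genotype / Call
--     for key in ["genotype", "call", "gt", "alleles", "result"]:
--         if key in normalized:
--             mapping["genotype"] = normalized[key]
--             break
--
--     # Gene
--     for key in ["gene", "gene_symbol", "gene_name"]:
--         if key in normalized:
--             mapping["gene"] = normalized[key]
--             break
--
--     # Variant name
--     for key in ["variant", "variant_name", "hgvs"]:
--         if key in normalized:
--             mapping["variant"] = normalized[key]
--             break
--
--     # Star allele
--     for key in ["star", "star_allele", "diplotype", "haplotype"]: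
--         if key in normalized:
--             mapping["star"] = normalized[key]
--             break
--
--     # Allele 1
--     for key in ["allele1", "allele_1", "a1"]:
--         if key in normalized:
--             mapping["allele1"] = normalized[key]
--             break
--
--     # Allele 2
--     for key in ["allele2", "allele_2", "a2"]:
--         if key in normalized:
--             mapping["allele2"] = normalized[key]
--             break
--
--     # Zygosity
--     for key in ["zyg", "zygosity", "het_hom"]:
--         if key in normalized:
--             mapping["zygosity"] = normalized[key]
--             break
--
--     return mapping
-- ===== SOURCE B (Python) =====
-- from typing import Dict, List
--
-- SYNONYMS = {
--     "rsid": ["rsid", "snp", "rs_id", "variant_id"],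
--     "genotype": ["genotype", "call", "gt", "alleles", "result"],
--     "gene": ["gene", "gene_symbol", "gene_name"],
--     "variant": ["variant", "variant_name", "hgvs"],
--     "star": ["star", "star_allele", "diplotype", "haplotype"],
--     "allele1": ["allele1", "allele_1", "a1"],
--     "allele2": ["allele2", "allele_2", "a2"],
--     "zygosity": ["zyg", "zygosity", "het_hom"],
-- }
--
-- # reverse lookup: synonym -> (semantic name, priority index)
-- REVERSE = {syn: (sem, i)
--            for sem, syns in SYNONYMS.items()
--            for i, syn in enumerate(syns)}
--
-- def normalize_column_name(name: str) -> str: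
--     """Normalize column names to lowercase and strip whitespace."""
--     return str(name).lower().strip().replace(" ", "_")
--
-- def infer_column_mapping(columns: List[str]) -> Dict[str, str]:
--     """
--     Infer semantic meaning of columns from their names.
--
--     Returns dict mapping semantic name to actual column name.
--     """
--     normalized = {normalize_column_name(c): c for c in columns}
--     best = {}  # semantic -> (priority index, column)
--     for key, col in normalized.items():
--         hit = REVERSE.get(key)
--         if hit is not None:
--             sem, pri = hit
--             if sem not in best or pri < best[sem][0]:
--                 best[sem] = (pri, col)
--     return {sem: best[sem][1] for sem in SYNONYMS if sem in best}
-- ===== Notes on version B (the rewrite author's own statement) =====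
-- stated objective: alternative
-- what changed: Replaces A's eight hard-coded synonym-list scans against the normalized-column dict with a reverse synonym->(semantic, priority) lookup table built once, plus a single pass over the normalized columns keeping the minimum-priority candidate per semantic.
import Mathlib
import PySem

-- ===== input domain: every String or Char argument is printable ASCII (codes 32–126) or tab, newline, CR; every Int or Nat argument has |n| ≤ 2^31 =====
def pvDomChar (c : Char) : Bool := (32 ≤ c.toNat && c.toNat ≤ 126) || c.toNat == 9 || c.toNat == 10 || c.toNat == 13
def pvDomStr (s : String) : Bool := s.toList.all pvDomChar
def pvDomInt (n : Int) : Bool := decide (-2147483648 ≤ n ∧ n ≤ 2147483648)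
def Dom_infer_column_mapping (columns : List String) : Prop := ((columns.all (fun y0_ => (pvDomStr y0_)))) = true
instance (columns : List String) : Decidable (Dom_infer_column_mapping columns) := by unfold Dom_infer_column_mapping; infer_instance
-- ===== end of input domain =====

-- B replaces A's eight fixed synonym scans with a reverse synonym→(semantic, priority) table consulted in
-- one pass over the normalized columns (objective: alternative; same output, different traversal).

-- ===== PORT A =====

-- str(name).lower().strip().replace(" ", "_")
def normalize_column_name (name : String) : String :=
  PySem.Str.replace (PySem.Str.strip (PySem.Str.lower name)) " " "_"

-- 'for key in ks: if key in normalized: <target> = normalized[key]; break'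
def firstMatchA (nd : PySem.Dict String String) : List String → Option String
  | [] => none
  | k :: ks =>
    match nd.get? k with
    | some v => some v
    | none => firstMatchA nd ks

def infer_column_mapping (columns : List String) : List (String × String) :=
  let normalized : PySem.Dict String String :=
    columns.foldl (fun d c => d.insert (normalize_column_name c) c) PySem.Dict.empty
  let mapping : PySem.Dict String String := PySem.Dict.empty
  let mapping := match firstMatchA normalized ["rsid", "snp", "rs_id", "variant_id"] with
    | some v => mapping.insert "rsid" v
    | none => mapping
  let mapping := match firstMatchA normalized ["genotype", "call", "gt", "alleles", "result"] with
    | some v => mapping.insert "genotype" v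
    | none => mapping
  let mapping := match firstMatchA normalized ["gene", "gene_symbol", "gene_name"] with
    | some v => mapping.insert "gene" v
    | none => mapping
  let mapping := match firstMatchA normalized ["variant", "variant_name", "hgvs"] with
    | some v => mapping.insert "variant" v
    | none => mapping
  let mapping := match firstMatchA normalized ["star", "star_allele", "diplotype", "haplotype"] with
    | some v => mapping.insert "star" v
    | none => mapping
  let mapping := match firstMatchA normalized ["allele1", "allele_1", "a1"] with
    | some v => mapping.insert "allele1" v
    | none => mapping
  let mapping := match firstMatchA normalized ["allele2", "allele_2", "a2"] with
    | some v => mapping.insert "allele2" v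
    | none => mapping
  let mapping := match firstMatchA normalized ["zyg", "zygosity", "het_hom"] with
    | some v => mapping.insert "zygosity" v
    | none => mapping
  mapping.items

-- ===== PORT B =====

-- the SYNONYMS table of Source B, in its insertion order
def synGroups : List (String × List String) :=
  [ ("rsid", ["rsid", "snp", "rs_id", "variant_id"])
  , ("genotype", ["genotype", "call", "gt", "alleles", "result"])
  , ("gene", ["gene", "gene_symbol", "gene_name"])
  , ("variant", ["variant", "variant_name", "hgvs"])
  , ("star", ["star", "star_allele", "diplotype", "haplotype"])
  , ("allele1", ["allele1", "allele_1", "a1"])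
  , ("allele2", ["allele2", "allele_2", "a2"])
  , ("zygosity", ["zyg", "zygosity", "het_hom"]) ]

-- REVERSE = {syn: (sem, i) for sem, syns in SYNONYMS.items() for i, syn in enumerate(syns)}
def reverseTable : PySem.Dict String (String × Int) :=
  synGroups.foldl
    (fun r p => (PySem.List.enumerate p.2).foldl (fun r2 q => r2.insert q.2 (p.1, q.1)) r)
    PySem.Dict.empty

-- the loop body of 'for key, col in normalized.items(): …'; the getD default (0, "") is never
-- used: like Python's short-circuit 'sem not in best or pri < best[sem][0]' it is read only
-- when the key is present
def bStep (b : PySem.Dict String (Int × String)) (kc : String × String) :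
    PySem.Dict String (Int × String) :=
  match reverseTable.get? kc.1 with
  | none => b
  | some sp =>
    if !b.contains sp.1 || decide (sp.2 < (b.getD sp.1 (0, "")).1) then
      b.insert sp.1 (sp.2, kc.2)
    else b

def infer_column_mapping_alt (columns : List String) : List (String × String) :=
  let normalized : PySem.Dict String String :=
    columns.foldl (fun d c => d.insert (normalize_column_name c) c) PySem.Dict.empty
  let best := normalized.items.foldl bStep PySem.Dict.empty
  -- {sem: best[sem][1] for sem in SYNONYMS if sem in best}
  (synGroups.foldl
    (fun (out : PySem.Dict String String) p =>
      if best.contains p.1 then out.insert p.1 (best.getD p.1 (0, "")).2 else out)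
    PySem.Dict.empty).items

-- ===== PRECONDITION & SPEC =====
def Spec_infer_column_mapping (columns : List String) (out : List (String × String)) : Prop := out = infer_column_mapping_alt columns
instance (columns : List String) (out : List (String × String)) : Decidable (Spec_infer_column_mapping columns out) := by unfold Spec_infer_column_mapping; infer_instance

-- ===== CLAIM (what is proved, stated in full; the proofs are below) =====
def Claim_equal_infer_column_mapping : Prop := ∀ (columns : List String), Dom_infer_column_mapping columns → Spec_infer_column_mapping columns (infer_column_mapping columns)

-- ===== LEMMAS AND PROOFS =====

-- priority of a key inside one synonym list (its index), as B's enumerate produces it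
def prio : List String → String → Option Int
  | [], _ => none
  | k :: ks, x => if x = k then some 0 else (prio ks x).map (· + 1)

def minStep (o : Option (Int × String)) (c : Int × String) : Option (Int × String) :=
  match o with
  | none => some c
  | some pv => if c.1 < pv.1 then some c else some pv

def foldMin (o : Option (Int × String)) (l : List (Int × String)) : Option (Int × String) :=
  l.foldl minStep o

def revPrio (sem k : String) : Option Int :=
  match reverseTable.get? k with
  | some sp => if sp.1 = sem then some sp.2 else none
  | none => none

def allSyns : List String :=
  ["rsid", "snp", "rs_id", "variant_id", "genotype", "call", "gt", "alleles", "result",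
   "gene", "gene_symbol", "gene_name", "variant", "variant_name", "hgvs",
   "star", "star_allele", "diplotype", "haplotype", "allele1", "allele_1", "a1",
   "allele2", "allele_2", "a2", "zyg", "zygosity", "het_hom"]

lemma reverseTable_keys : reverseTable.keys = allSyns := by decide

lemma reverseTable_get_none {k : String} (hk : k ∉ allSyns) : reverseTable.get? k = none := by
  rw [PySem.Dict.get?_eq_none_iff_not_mem_keys, reverseTable_keys]
  exact hk

lemma prio_none_of_not_mem {ks : List String} {k : String} (h : k ∉ ks) : prio ks k = none := by
  induction ks with
  | nil => rfl
  | cons a as ih =>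
    simp only [List.mem_cons, not_or] at h
    simp [prio, h.1, ih h.2]

lemma prio_nonneg : ∀ (ks : List String) (k : String) (p : Int), prio ks k = some p → 0 ≤ p := by
  intro ks
  induction ks with
  | nil => intro k p h; simp [prio] at h
  | cons a as ih =>
    intro k p h
    by_cases hk : k = a
    · simp [prio, hk] at h; omega
    · simp only [prio, if_neg hk, Option.map_eq_some_iff] at h
      obtain ⟨q, hq, rfl⟩ := h
      have := ih k q hq
      omega

-- the eight pointwise table lemmas
lemma revPrio_rsid (k : String) : revPrio "rsid" k = prio ["rsid", "snp", "rs_id", "variant_id"] k := by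
  by_cases hk : k ∈ allSyns
  · fin_cases hk <;> decide
  · have h2 : k ∉ ["rsid", "snp", "rs_id", "variant_id"] := by
      intro h; apply hk
      simp only [allSyns, List.mem_cons] at h ⊢; tauto
    simp [revPrio, reverseTable_get_none hk, prio_none_of_not_mem h2]
lemma revPrio_genotype (k : String) : revPrio "genotype" k = prio ["genotype", "call", "gt", "alleles", "result"] k := by
  by_cases hk : k ∈ allSyns
  · fin_cases hk <;> decide
  · have h2 : k ∉ ["genotype", "call", "gt", "alleles", "result"] := by
      intro h; apply hk
      simp only [allSyns, List.mem_cons] at h ⊢; tauto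
    simp [revPrio, reverseTable_get_none hk, prio_none_of_not_mem h2]
lemma revPrio_gene (k : String) : revPrio "gene" k = prio ["gene", "gene_symbol", "gene_name"] k := by
  by_cases hk : k ∈ allSyns
  · fin_cases hk <;> decide
  · have h2 : k ∉ ["gene", "gene_symbol", "gene_name"] := by
      intro h; apply hk
      simp only [allSyns, List.mem_cons] at h ⊢; tauto
    simp [revPrio, reverseTable_get_none hk, prio_none_of_not_mem h2]
lemma revPrio_variant (k : String) : revPrio "variant" k = prio ["variant", "variant_name", "hgvs"] k := by
  by_cases hk : k ∈ allSyns
  · fin_cases hk <;> decide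
  · have h2 : k ∉ ["variant", "variant_name", "hgvs"] := by
      intro h; apply hk
      simp only [allSyns, List.mem_cons] at h ⊢; tauto
    simp [revPrio, reverseTable_get_none hk, prio_none_of_not_mem h2]
lemma revPrio_star (k : String) : revPrio "star" k = prio ["star", "star_allele", "diplotype", "haplotype"] k := by
  by_cases hk : k ∈ allSyns
  · fin_cases hk <;> decide
  · have h2 : k ∉ ["star", "star_allele", "diplotype", "haplotype"] := by
      intro h; apply hk
      simp only [allSyns, List.mem_cons] at h ⊢; tauto
    simp [revPrio, reverseTable_get_none hk, prio_none_of_not_mem h2]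
lemma revPrio_allele1 (k : String) : revPrio "allele1" k = prio ["allele1", "allele_1", "a1"] k := by
  by_cases hk : k ∈ allSyns
  · fin_cases hk <;> decide
  · have h2 : k ∉ ["allele1", "allele_1", "a1"] := by
      intro h; apply hk
      simp only [allSyns, List.mem_cons] at h ⊢; tauto
    simp [revPrio, reverseTable_get_none hk, prio_none_of_not_mem h2]
lemma revPrio_allele2 (k : String) : revPrio "allele2" k = prio ["allele2", "allele_2", "a2"] k := by
  by_cases hk : k ∈ allSyns
  · fin_cases hk <;> decide
  · have h2 : k ∉ ["allele2", "allele_2", "a2"] := by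
      intro h; apply hk
      simp only [allSyns, List.mem_cons] at h ⊢; tauto
    simp [revPrio, reverseTable_get_none hk, prio_none_of_not_mem h2]
lemma revPrio_zygosity (k : String) : revPrio "zygosity" k = prio ["zyg", "zygosity", "het_hom"] k := by
  by_cases hk : k ∈ allSyns
  · fin_cases hk <;> decide
  · have h2 : k ∉ ["zyg", "zygosity", "het_hom"] := by
      intro h; apply hk
      simp only [allSyns, List.mem_cons] at h ⊢; tauto
    simp [revPrio, reverseTable_get_none hk, prio_none_of_not_mem h2]

-- invariant of B's single pass: per semantic it maintains the running minimum-priority candidate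
lemma bestOf_get (sem : String) :
    ∀ (items : List (String × String)) (b : PySem.Dict String (Int × String)),
      (items.foldl bStep b).get? sem
        = foldMin (b.get? sem)
            (items.filterMap (fun kc => (revPrio sem kc.1).map (fun p => (p, kc.2)))) := by
  intro items
  induction items with
  | nil => intro b; rfl
  | cons kc rest ih =>
    intro b
    rw [List.foldl_cons, ih]
    rcases h : reverseTable.get? kc.1 with _ | sp
    · have hb : bStep b kc = b := by simp [bStep, h]
      have hr : revPrio sem kc.1 = none := by simp [revPrio, h]
      rw [hb, List.filterMap_cons, hr]
      rfl
    · by_cases hs : sp.1 = sem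
      · have hr : revPrio sem kc.1 = some sp.2 := by simp [revPrio, h, hs]
        rw [List.filterMap_cons, hr]
        simp only [Option.map_some]
        have hstep : (bStep b kc).get? sem = minStep (b.get? sem) (sp.2, kc.2) := by
          rcases hb : b.get? sem with _ | pv
          · have hc : b.contains sem = false := by
              rw [PySem.Dict.contains_eq_isSome_get?, hb]; rfl
            simp [bStep, h, hs, hc, minStep, PySem.Dict.get?_insert_self]
          · have hc : b.contains sem = true := by
              rw [PySem.Dict.contains_eq_isSome_get?, hb]; rfl
            have hd : b.getD sem (0, "") = pv := by
              rw [PySem.Dict.getD_eq_get?_getD, hb]; rfl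
            by_cases hlt : sp.2 < pv.1
            · simp [bStep, h, hs, hc, hd, hlt, minStep, PySem.Dict.get?_insert_self]
            · simp [bStep, h, hs, hc, hd, hlt, minStep, hb]
        rw [hstep]
        rfl
      · have hr : revPrio sem kc.1 = none := by simp [revPrio, h, hs]
        have hstep : (bStep b kc).get? sem = b.get? sem := by
          simp only [bStep, h]
          split
          · exact PySem.Dict.get?_insert_of_ne _ _ (fun he => hs he.symm)
          · rfl
        rw [List.filterMap_cons, hr, hstep]
        rfl

def shift (c : Int × String) : Int × String := (c.1 + 1, c.2)

lemma foldMin_shift : ∀ (l : List (Int × String)) (o : Option (Int × String)),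
    foldMin (o.map shift) (l.map shift) = (foldMin o l).map shift := by
  intro l
  induction l with
  | nil => intro o; rfl
  | cons c cs ih =>
    intro o
    have hstep : minStep (o.map shift) (shift c) = (minStep o c).map shift := by
      rcases o with _ | pv
      · rfl
      · by_cases hlt : c.1 < pv.1 <;>
          simp [minStep, shift, hlt, show c.1 + 1 < pv.1 + 1 ↔ c.1 < pv.1 by omega]
    simpa [foldMin, hstep] using ih (minStep o c)

lemma foldMin_result : ∀ (l : List (Int × String)) (o : Option (Int × String)),
    foldMin o l = o ∨ ∃ c ∈ l, foldMin o l = some c := by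
  intro l
  induction l with
  | nil => intro o; exact Or.inl rfl
  | cons c cs ih =>
    intro o
    rcases ih (minStep o c) with h | ⟨d, hd, h⟩
    · rcases o with _ | pv
      · right; exact ⟨c, by simp, by simpa [foldMin, minStep] using h⟩
      · by_cases hlt : c.1 < pv.1
        · right; exact ⟨c, by simp, by simpa [foldMin, minStep, hlt] using h⟩
        · left; simpa [foldMin, minStep, hlt] using h
    · right; exact ⟨d, by simp [hd], by simpa [foldMin] using h⟩

lemma foldMin_keep : ∀ (l : List (Int × String)) (pv : Int × String),
    (∀ c ∈ l, ¬ c.1 < pv.1) → foldMin (some pv) l = some pv := by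
  intro l
  induction l with
  | nil => intro pv _; rfl
  | cons c cs ih =>
    intro pv h
    have hc := h c (by simp)
    have := ih pv (fun d hd => h d (by simp [hd]))
    simpa [foldMin, minStep, hc] using this

-- the bridge: the minimum-priority candidate is exactly A's first synonym hit
lemma min_eq_firstMatch : ∀ (ks : List String) (nd : PySem.Dict String String),
    nd.keys.Nodup →
    (foldMin none (nd.items.filterMap (fun kc => (prio ks kc.1).map (fun p => (p, kc.2))))).map (·.2)
      = firstMatchA nd ks := by
  intro ks
  induction ks with
  | nil =>
    intro nd _
    simp [prio, firstMatchA, foldMin]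
  | cons k ks ih =>
    intro nd hnd
    rcases hv : nd.get? k with _ | v
    · -- no column matches the head synonym: all priorities shift by one
      have hk : k ∉ nd.items.map Prod.fst := by
        rw [← PySem.Dict.keys]
        exact (PySem.Dict.get?_eq_none_iff_not_mem_keys _ _).1 hv
      have hcong : nd.items.filterMap (fun kc => (prio (k :: ks) kc.1).map (fun p => (p, kc.2)))
          = nd.items.filterMap
              (fun kc => ((prio ks kc.1).map (fun p => (p, kc.2))).map shift) := by
        apply List.filterMap_congr
        intro kc hkc
        have hne : kc.1 ≠ k := by
          intro he; exact hk (he ▸ List.mem_map_of_mem hkc)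
        simp only [prio, if_neg hne, Option.map_map]
        cases prio ks kc.1 <;> rfl
      rw [hcong, ← List.map_filterMap]
      have := foldMin_shift
        (nd.items.filterMap (fun kc => (prio ks kc.1).map (fun p => (p, kc.2)))) none
      simp only [Option.map_none] at this
      rw [this, Option.map_map]
      have h2 : ((·.2 : Int × String → String) ∘ shift) = (·.2) := by
        funext c; rfl
      rw [h2, ih nd hnd]
      simp [firstMatchA, hv]
    · -- the head synonym is present: its candidate has priority 0 and wins
      have hmem : (k, v) ∈ nd.items := PySem.Dict.mem_items_of_get?_eq_some _ hv
      obtain ⟨l1, l2, hit⟩ := List.append_of_mem hmem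
      have hkeys : (nd.items.map Prod.fst).Nodup := by
        rw [← PySem.Dict.keys]; exact hnd
      rw [hit] at hkeys
      simp only [List.map_append, List.map_cons, List.nodup_append, List.nodup_cons,
        List.mem_cons] at hkeys
      have hk1 : k ∉ l1.map Prod.fst := by
        intro h
        exact hkeys.2.2 k h k (Or.inl rfl) rfl
      have hk2 : k ∉ l2.map Prod.fst := hkeys.2.1.1
      have hlb : ∀ (l : List (String × String)), k ∉ l.map Prod.fst →
          ∀ c ∈ l.filterMap (fun kc => (prio (k :: ks) kc.1).map (fun p => (p, kc.2))),
            1 ≤ c.1 := by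
        intro l hkl c hc
        obtain ⟨kc, hkc, hfc⟩ := List.mem_filterMap.1 hc
        have hne : kc.1 ≠ k := fun he => hkl (he ▸ List.mem_map_of_mem hkc)
        simp only [prio, if_neg hne, Option.map_map, Option.map_eq_some_iff] at hfc
        obtain ⟨p, hp, rfl⟩ := hfc
        have := prio_nonneg ks kc.1 p hp
        simp; omega
      rw [hit, List.filterMap_append, List.filterMap_cons]
      have hhead : (prio (k :: ks) (k, v).1).map (fun p => (p, (k, v).2)) = some (0, v) := by
        simp [prio]
      rw [hhead]
      set A := l1.filterMap (fun kc => (prio (k :: ks) kc.1).map (fun p => (p, kc.2))) with hA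
      set B := l2.filterMap (fun kc => (prio (k :: ks) kc.1).map (fun p => (p, kc.2))) with hB
      have hfold : foldMin none (A ++ (0, v) :: B) = foldMin (minStep (foldMin none A) (0, v)) B := by
        simp [foldMin, List.foldl_append]
      rw [hfold]
      have hmid : minStep (foldMin none A) (0, v) = some (0, v) := by
        rcases foldMin_result A none with h | ⟨c, hc, h⟩
        · rw [h]; rfl
        · rw [h]
          have := hlb l1 hk1 c hc
          simp [minStep]; omega
      rw [hmid, foldMin_keep B (0, v) (fun c hc => by have := hlb l2 hk2 c hc; simp; omega)]
      simp [firstMatchA, hv]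

-- one semantic group: A's break-scan block equals B's lookup in the best-candidate table
lemma stepAB (nd : PySem.Dict String String) (hnd : nd.keys.Nodup) (sem : String)
    (ks : List String) (hrev : ∀ k, revPrio sem k = prio ks k)
    (m : PySem.Dict String String) :
    (match firstMatchA nd ks with
     | some v => m.insert sem v
     | none => m)
      = (if (nd.items.foldl bStep PySem.Dict.empty).contains sem then
           m.insert sem ((nd.items.foldl bStep PySem.Dict.empty).getD sem (0, "")).2
         else m) := by
  have hget : ((nd.items.foldl bStep PySem.Dict.empty).get? sem).map (·.2)
      = firstMatchA nd ks := by
    rw [bestOf_get]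
    simp only [PySem.Dict.get?_empty, hrev]
    exact min_eq_firstMatch ks nd hnd
  rcases h : (nd.items.foldl bStep PySem.Dict.empty).get? sem with _ | pv
  · rw [h] at hget
    have hc : (nd.items.foldl bStep PySem.Dict.empty).contains sem = false := by
      rw [PySem.Dict.contains_eq_isSome_get?, h]; rfl
    rw [← hget, hc]
    simp
  · rw [h] at hget
    have hc : (nd.items.foldl bStep PySem.Dict.empty).contains sem = true := by
      rw [PySem.Dict.contains_eq_isSome_get?, h]; rfl
    have hd : (nd.items.foldl bStep PySem.Dict.empty).getD sem (0, "") = pv := by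
      rw [PySem.Dict.getD_eq_get?_getD, h]; rfl
    rw [← hget, hc, hd]
    simp

-- ===== VERDICT (by name: the statement is the Claim_ definition above) =====
theorem infer_column_mapping_spec : Claim_equal_infer_column_mapping := by
  intro columns _
  unfold Spec_infer_column_mapping infer_column_mapping infer_column_mapping_alt
  have hnd : (columns.foldl (fun d c => d.insert (normalize_column_name c) c)
      PySem.Dict.empty).keys.Nodup :=
    PySem.Dict.nodup_keys_foldl_insert_key columns normalize_column_name (fun _ c => c)
      PySem.Dict.empty PySem.Dict.nodup_keys_empty
  simp only [synGroups, List.foldl]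
  rw [stepAB _ hnd _ _ revPrio_rsid, stepAB _ hnd _ _ revPrio_genotype,
      stepAB _ hnd _ _ revPrio_gene, stepAB _ hnd _ _ revPrio_variant,
      stepAB _ hnd _ _ revPrio_star, stepAB _ hnd _ _ revPrio_allele1,
      stepAB _ hnd _ _ revPrio_allele2, stepAB _ hnd _ _ revPrio_zygosity]
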